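-- pv_equiv track=rewrite | github.com/CoteMaster/study_history | 20200621_programmers_heap/ramen_factory.py | solution
-- ===== SOURCE A (Python) =====
-- import heapq
--
-- def solution(stock, dates, supplies, k):
--     answer = 0
--     h = []
--     d = 0
--     while stock < k:
--         while d < len(dates) and dates[d] <= stock:
--             heapq.heappush(h, -supplies[d])
--             d += 1
--         stock += -heapq.heappop(h)
--         answer += 1
--     return answer
-- ===== SOURCE B (Python) =====
-- def solution(stock, dates, supplies, k):
--     answer = 0
--     avail = []  # ascending; pops only remove the tail, and each batch triggers a re-sort
--     d = 0
--     while stock < k: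
--         new = []
--         while d < len(dates) and dates[d] <= stock:
--             new.append(supplies[d])
--             d += 1
--         if new:
--             avail = sorted(avail + new)
--         stock += avail.pop()  # IndexError on empty, exactly like A's heappop([])
--         answer += 1
--     return answer
-- ===== Notes on version B (the rewrite author's own statement) =====
-- stated objective: alternative
-- what changed: B drops the heapq max-heap of negated supplies: it batches the newly available supplies, re-sorts a plain ascending list with sorted() when a batch arrives, and takes each delivery by popping the maximum from the back.
-- outside the precondition, e.g. on solution(0, [0, 0], [-1, 10], 5): A returns 1, B returns 1; on solution(0, [0, 0], [5, 5, 7], 6): A returns 2, B returns 2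
import Mathlib
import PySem

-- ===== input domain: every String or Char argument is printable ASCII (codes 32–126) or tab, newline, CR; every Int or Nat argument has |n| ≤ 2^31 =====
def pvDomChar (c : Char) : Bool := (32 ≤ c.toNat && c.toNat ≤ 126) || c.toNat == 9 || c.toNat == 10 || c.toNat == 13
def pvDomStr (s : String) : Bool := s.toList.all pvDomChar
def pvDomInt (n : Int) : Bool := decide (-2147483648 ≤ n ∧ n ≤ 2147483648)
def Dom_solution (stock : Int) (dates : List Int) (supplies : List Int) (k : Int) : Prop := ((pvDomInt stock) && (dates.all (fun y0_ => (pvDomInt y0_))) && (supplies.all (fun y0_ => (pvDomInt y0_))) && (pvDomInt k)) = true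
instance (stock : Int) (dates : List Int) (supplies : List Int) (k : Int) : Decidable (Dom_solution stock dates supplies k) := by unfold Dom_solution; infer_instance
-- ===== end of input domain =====

-- B replaces A's heapq max-heap of negated supplies by a plain ascending list: each batch of newly
-- available supplies is appended and the list re-sorted, the maximum popped from the back ('alternative').

-- ===== PORT A =====
-- heapq.heappush: stdlib call, ported by contract (adds x to the heap's multiset)
def pvHeapPush (h : List Int) (x : Int) : List Int := h ++ [x]

-- first index of the minimum value of a list (ties: smallest index), with that value
def pvIdxMin : List Int → Option (Nat × Int)
  | [] => none
  | x :: xs =>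
    match pvIdxMin xs with
    | none => some (0, x)
    | some (j, m) => if x ≤ m then some (0, x) else some (j + 1, m)

-- heapq.heappop: stdlib call, ported by contract (returns the minimum value and the heap's
-- multiset without one occurrence of it; none exactly where heappop([]) raises IndexError)
def pvHeapPop (h : List Int) : Option (Int × List Int) :=
  match pvIdxMin h with
  | none => none
  | some (j, m) => some (m, h.eraseIdx j)

-- inner 'while d < len(dates) and dates[d] <= stock' of A; fuel = dates.length - d
def pvPushA (dates supplies : List Int) (stock : Int) : Nat → List Int → Nat → List Int × Nat
  | 0, h, d => (h, d)
  | f + 1, h, d =>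
    if d < dates.length ∧ dates.getD d 0 ≤ stock then
      pvPushA dates supplies stock f (pvHeapPush h (-(supplies.getD d 0))) (d + 1)
    else (h, d)

-- outer 'while stock < k' of A; each iteration pops one pushed element, and at most
-- dates.length elements are ever pushed, so fuel dates.length + 1 is never exhausted when A returns
def pvLoopA (dates supplies : List Int) (k : Int) : Nat → Int → List Int → Nat → Int → Int
  | 0, answer, _, _, _ => answer
  | f + 1, answer, h, d, stock =>
    if stock < k then
      match pvHeapPop (pvPushA dates supplies stock (dates.length - d) h d).1 with
      | none => answer -- Python raises IndexError here (heappop([])); excluded by Pre_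
      | some (m, h'') =>
        pvLoopA dates supplies k f (answer + 1) h''
          (pvPushA dates supplies stock (dates.length - d) h d).2 (stock + (-m))
    else answer

def solution (stock : Int) (dates : List Int) (supplies : List Int) (k : Int) : Int :=
  pvLoopA dates supplies k (dates.length + 1) 0 [] 0 stock

-- ===== PORT B =====
-- B's inner 'while d < len(dates) and dates[d] <= stock' (appends supplies[d] to the batch 'new')
def pvGather (dates supplies : List Int) (stock : Int) : Nat → List Int → Nat → List Int × Nat
  | 0, new, d => (new, d)
  | f + 1, new, d =>
    if d < dates.length ∧ dates.getD d 0 ≤ stock then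
      pvGather dates supplies stock f (new ++ [supplies.getD d 0]) (d + 1)
    else (new, d)

-- B's 'if new: avail = sorted(avail + new)' (sorted = stdlib call, ported as PySem.List.sorted)
def pvMerge (avail new : List Int) : List Int :=
  if new = [] then avail else PySem.List.sorted (avail ++ new) (fun x => x) false

-- outer 'while stock < k' of B; 'avail.pop()' (pop the last element, IndexError on []) is ported
-- exactly as getLast?/dropLast: none exactly where Python raises
def pvLoopB (dates supplies : List Int) (k : Int) : Nat → Int → List Int → Nat → Int → Int
  | 0, answer, _, _, _ => answer
  | f + 1, answer, avail, d, stock =>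
    if stock < k then
      match (pvMerge avail (pvGather dates supplies stock (dates.length - d) [] d).1).getLast? with
      | none => answer -- avail.pop() on [] raises IndexError; excluded by Pre_
      | some v =>
        pvLoopB dates supplies k f (answer + 1)
          (pvMerge avail (pvGather dates supplies stock (dates.length - d) [] d).1).dropLast
          (pvGather dates supplies stock (dates.length - d) [] d).2 (stock + v)
    else answer

def solution_alt (stock : Int) (dates : List Int) (supplies : List Int) (k : Int) : Int :=
  pvLoopB dates supplies k (dates.length + 1) 0 [] 0 stock

-- ===== PRECONDITION & SPEC =====
-- stock reachable by consuming supplies in date-pointer order (the feasibility characterisation)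
def pvReach : List (Int × Int) → Int → Int
  | [], s => s
  | (dt, sp) :: rest, s => if dt ≤ s then pvReach rest (s + sp) else s

-- Pre_ excludes the inputs on which A's heappop hits an empty heap (IndexError) or supplies[d]
-- is out of range (IndexError); when deliveries are needed it restricts to the problem's natural
-- domain — parallel date/supply lists with non-negative supply amounts — which also excludes some
-- inputs (negative supplies or mismatched lengths never reached) on which A still returns.
def Pre_solution (stock : Int) (dates : List Int) (supplies : List Int) (k : Int) : Prop :=
  k ≤ stock ∨
    (dates.length = supplies.length ∧ (∀ x ∈ supplies, 0 ≤ x) ∧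
      k ≤ pvReach (dates.zip supplies) stock)
instance (stock : Int) (dates : List Int) (supplies : List Int) (k : Int) : Decidable (Pre_solution stock dates supplies k) := by unfold Pre_solution; infer_instance

def pvWitness_solution : Int × List Int × List Int × Int := (0, [0, 2], [3, 5], 4)

def Spec_solution (stock : Int) (dates : List Int) (supplies : List Int) (k : Int) (out : Int) : Prop := out = solution_alt stock dates supplies k
instance (stock : Int) (dates : List Int) (supplies : List Int) (k : Int) (out : Int) : Decidable (Spec_solution stock dates supplies k out) := by unfold Spec_solution; infer_instance

-- ===== CLAIM (what is proved, stated in full; the proofs are below) =====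
def Claim_equal_solution : Prop := ∀ (stock : Int) (dates : List Int) (supplies : List Int) (k : Int), Dom_solution stock dates supplies k → Pre_solution stock dates supplies k → Spec_solution stock dates supplies k (solution stock dates supplies k)

-- ===== LEMMAS AND PROOFS =====

-- The invariant tying A's heap to B's list: B's list is sorted ascending and is a permutation
-- of the negation of A's heap contents.
def pvInv (h b : List Int) : Prop :=
  b.Pairwise (· ≤ ·) ∧ (h.map (fun x => -x)).Perm b

lemma pvPushA_gather (dates supplies : List Int) (stock : Int) :
    ∀ (f d : Nat) (h pre : List Int),
      pvPushA dates supplies stock f (h ++ pre.map (fun s => -s)) d =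
        (h ++ ((pvGather dates supplies stock f pre d).1).map (fun s => -s),
          (pvGather dates supplies stock f pre d).2) := by
  intro f
  induction f with
  | zero => intro d h pre; rfl
  | succ f ih =>
    intro d h pre
    simp only [pvPushA, pvGather]
    split_ifs with hc
    · have h1 : pvHeapPush (h ++ pre.map (fun s => -s)) (-(supplies.getD d 0))
          = h ++ (pre ++ [supplies.getD d 0]).map (fun s => -s) := by
        simp [pvHeapPush]
    -- re-associate and apply the induction hypothesis on the extended batch
      rw [h1]
      exact ih (d + 1) h (pre ++ [supplies.getD d 0])
    · rfl

lemma pvInv_merge {h b : List Int} (hi : pvInv h b) (g : List Int) :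
    pvInv (h ++ g.map (fun s => -s)) (pvMerge b g) := by
  obtain ⟨hs, hp⟩ := hi
  by_cases hg : g = []
  · subst hg
    simpa [pvMerge] using And.intro hs hp
  · refine ⟨?_, ?_⟩
    · simpa [pvMerge, hg] using PySem.List.sorted_pairwise (b ++ g) (fun x => x)
    · rw [pvMerge, if_neg hg]
      have h1 : (h ++ g.map (fun s => -s)).map (fun x => -x)
          = h.map (fun x => -x) ++ g := by simp
      rw [h1]
      exact (hp.append_right g).trans
        (PySem.List.sorted_perm (b ++ g) (fun x => x) false).symm

lemma pvIdxMin_none {h : List Int} : pvIdxMin h = none ↔ h = [] := by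
  cases h with
  | nil => simp [pvIdxMin]
  | cons x xs =>
    simp only [pvIdxMin]
    cases hx : pvIdxMin xs with
    | none => simp
    | some p => obtain ⟨j, m⟩ := p; by_cases hc : x ≤ m <;> simp [hc]

lemma pvIdxMin_spec {h : List Int} {j : Nat} {m : Int} (hj : pvIdxMin h = some (j, m)) :
    h[j]? = some m ∧ ∀ x ∈ h, m ≤ x := by
  induction h generalizing j m with
  | nil => simp [pvIdxMin] at hj
  | cons x xs ih =>
    simp only [pvIdxMin] at hj
    cases hx : pvIdxMin xs with
    | none =>
      rw [hx] at hj
      simp at hj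
      obtain ⟨h1, h2⟩ := hj; subst h1; subst h2
      have hnil : xs = [] := pvIdxMin_none.mp hx
      subst hnil
      simp
    | some p =>
      obtain ⟨j', m'⟩ := p
      rw [hx] at hj
      obtain ⟨hg, hle⟩ := ih hx
      by_cases hc : x ≤ m'
      · simp [hc] at hj
        obtain ⟨h1, h2⟩ := hj; subst h1; subst h2
        refine ⟨by simp, ?_⟩
        intro y hy
        rcases List.mem_cons.mp hy with rfl | hy
        · exact le_refl _
        · exact le_trans hc (hle y hy)
      · simp [hc] at hj
        obtain ⟨h1, h2⟩ := hj; subst h1; subst h2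
        refine ⟨by simpa using hg, ?_⟩
        intro y hy
        rcases List.mem_cons.mp hy with rfl | hy
        · omega
        · exact hle y hy

lemma perm_cons_eraseIdx {h : List Int} {j : Nat} {m : Int} (hj : h[j]? = some m) :
    h.Perm (m :: h.eraseIdx j) := by
  induction h generalizing j with
  | nil => simp at hj
  | cons x xs ih =>
    cases j with
    | zero =>
      simp at hj; subst hj
      simp [List.eraseIdx]
    | succ j' =>
      simp only [List.getElem?_cons_succ] at hj
      have := ih hj
      have h2 : (x :: xs).eraseIdx (j' + 1) = x :: xs.eraseIdx j' := rfl
      rw [h2]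
      exact (this.cons x).trans (List.Perm.swap m x _)

lemma sorted_le_getLast : ∀ (b : List Int), b.Pairwise (· ≤ ·) → ∀ (hb : b ≠ []),
    ∀ x ∈ b, x ≤ b.getLast hb := by
  intro b
  induction b with
  | nil => intro _ hb; simp at hb
  | cons a t ih =>
    intro hs hb x hx
    cases t with
    | nil =>
      simp at hx; subst hx; simp [List.getLast]
    | cons c u =>
      have hne : (c :: u) ≠ [] := by simp
      rw [List.getLast_cons hne]
      have hst : (c :: u).Pairwise (· ≤ ·) := hs.of_cons
      rcases List.mem_cons.mp hx with rfl | hx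
      · have hmem := List.getLast_mem hne
        exact List.rel_of_pairwise_cons hs hmem
      · exact ih hst hne x hx

-- popping: A's heap minimum is the negation of the last element of B's sorted list,
-- and the remainders are again invariant-related
lemma pvPop_lockstep {h b : List Int} (hi : pvInv h b) {j : Nat} {m : Int}
    (hj : pvIdxMin h = some (j, m)) :
    ∃ (hb : b ≠ []), b.getLast hb = -m ∧ pvInv (h.eraseIdx j) b.dropLast := by
  obtain ⟨hs, hp⟩ := hi
  obtain ⟨hg, hmin⟩ := pvIdxMin_spec hj
  have hhne : h ≠ [] := by
    intro hnil; subst hnil; simp [pvIdxMin] at hj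
  have hbne : b ≠ [] := by
    intro hnil; subst hnil
    have := hp.length_eq
    simp at this
    exact hhne this
  refine ⟨hbne, ?_, ?_, ?_⟩
  · -- getLast b = -m
    have hvmem : b.getLast hbne ∈ b := List.getLast_mem hbne
    have hvmem' : b.getLast hbne ∈ h.map (fun x => -x) := hp.symm.subset hvmem
    obtain ⟨x, hxh, hxv⟩ := List.mem_map.mp hvmem'
    have h1 : m ≤ x := hmin x hxh
    have hmm : -m ∈ b := by
      apply hp.subset
      exact List.mem_map.mpr ⟨m, List.mem_of_getElem? hg, rfl⟩
    have h2 : -m ≤ b.getLast hbne := sorted_le_getLast b hs hbne _ hmm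
    omega
  · -- dropLast sorted
    exact List.Pairwise.sublist (List.dropLast_sublist b) hs
  · -- perm of remainders
    have hpermh : h.Perm (m :: h.eraseIdx j) := perm_cons_eraseIdx hg
    have hpermb : b.Perm (b.getLast hbne :: b.dropLast) := by
      conv_lhs => rw [← List.dropLast_append_getLast hbne]
      exact List.perm_append_singleton _ _
    have hv : b.getLast hbne = -m := by
      have hvmem : b.getLast hbne ∈ b := List.getLast_mem hbne
      have hvmem' : b.getLast hbne ∈ h.map (fun x => -x) := hp.symm.subset hvmem
      obtain ⟨x, hxh, hxv⟩ := List.mem_map.mp hvmem'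
      have h1 : m ≤ x := hmin x hxh
      have hmm : -m ∈ b := by
        apply hp.subset
        exact List.mem_map.mpr ⟨m, List.mem_of_getElem? hg, rfl⟩
      have h2 : -m ≤ b.getLast hbne := sorted_le_getLast b hs hbne _ hmm
      omega
    have hmap : (m :: h.eraseIdx j).map (fun x => -x)
        = (-m) :: (h.eraseIdx j).map (fun x => -x) := by simp
    have hchain : ((-m) :: (h.eraseIdx j).map (fun x => -x)).Perm ((-m) :: b.dropLast) := by
      rw [← hmap, ← hv]
      exact ((hpermh.map _).symm.trans hp).trans hpermb
    exact hchain.cons_inv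

lemma pvLoop_lockstep (dates supplies : List Int) (k : Int) :
    ∀ (f : Nat) (answer : Int) (d : Nat) (stock : Int) (h b : List Int), pvInv h b →
      pvLoopA dates supplies k f answer h d stock =
        pvLoopB dates supplies k f answer b d stock := by
  intro f
  induction f with
  | zero => intro answer d stock h b _; rfl
  | succ f ih =>
    intro answer d stock h b hi
    simp only [pvLoopA, pvLoopB]
    by_cases hk : stock < k
    · simp only [if_pos hk]
      have hdec := pvPushA_gather dates supplies stock (dates.length - d) d h []
      simp only [List.map_nil, List.append_nil] at hdec
      set G := (pvGather dates supplies stock (dates.length - d) [] d).1 with hG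
      set d2 := (pvGather dates supplies stock (dates.length - d) [] d).2 with hd2
      have hA1 : (pvPushA dates supplies stock (dates.length - d) h d).1
          = h ++ G.map (fun s => -s) := by rw [hdec]
      have hA2 : (pvPushA dates supplies stock (dates.length - d) h d).2 = d2 := by rw [hdec]
      have hi' : pvInv (h ++ G.map (fun s => -s)) (pvMerge b G) := pvInv_merge hi G
      rw [hA1, hA2]
      set h' := h ++ G.map (fun s => -s) with hh'
      set b' := pvMerge b G with hb'
      cases hmin : pvIdxMin h' with
      | none =>
        have hnil : h' = [] := pvIdxMin_none.mp hmin
        have hbnil : b' = [] := by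
          have h0 : List.Perm [] b' := by simpa [hnil] using hi'.2
          exact h0.symm.eq_nil
        simp [pvHeapPop, hmin, hbnil]
      | some p =>
        obtain ⟨j, m⟩ := p
        obtain ⟨hbne, hlast, hinv'⟩ := pvPop_lockstep hi' hmin
        have hlast? : b'.getLast? = some (-m) := by
          rw [List.getLast?_eq_some_getLast hbne, hlast]
        simp only [pvHeapPop, hmin, hlast?]
        exact ih (answer + 1) d2 (stock + -m) _ _ hinv'
    · simp only [if_neg hk]

-- ===== VERDICT (by name: the statement is the Claim_ definition above) =====
theorem solution_spec : Claim_equal_solution := by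
  intro stock dates supplies k _hdom _hpre
  unfold Spec_solution solution solution_alt
  exact pvLoop_lockstep dates supplies k (dates.length + 1) 0 0 stock [] [] ⟨by simp, by simp⟩
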